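-- pv_equiv track=rewrite | github.com/pmohanty98/EDLP | tsp_sample.py | swap_distance
-- ===== SOURCE A (Python) =====
-- def swap_distance(path1, path2):
--     """Calculates the number of swaps (2-opt moves) needed to convert path1 into path2."""
--     path1=path1+(path1[0],)
--     path2 = path2 + (path2[0],)
--
--     distance = 0
--     for i in range(len(path1)):
--         for j in range(i + 1, len(path1)):
--             # Check if the pairwise order is different in the two paths
--             if (path1[i], path1[j]) != (path2[i], path2[j]):
--                 distance += 1
--     return distance
-- ===== SOURCE B (Python) =====
-- def swap_distance(path1, path2):
--     """Calculates the number of swaps (2-opt moves) needed to convert path1 into path2."""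
--     e1 = path1 + (path1[0],)
--     e2 = path2 + (path2[0],)
--     n = len(e1)
--     m = sum(1 for i in range(n) if e1[i] == e2[i])
--     return n * (n - 1) // 2 - m * (m - 1) // 2
-- ===== Notes on version B (the rewrite author's own statement) =====
-- stated objective: faster
-- what changed: Replaces A's O(n^2) double loop over index pairs by a single O(n) pass that counts the m positions where the two extended paths agree and returns C(n,2) - C(m,2), since a pair (i,j) differs exactly unless both positions agree.
import Mathlib
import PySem

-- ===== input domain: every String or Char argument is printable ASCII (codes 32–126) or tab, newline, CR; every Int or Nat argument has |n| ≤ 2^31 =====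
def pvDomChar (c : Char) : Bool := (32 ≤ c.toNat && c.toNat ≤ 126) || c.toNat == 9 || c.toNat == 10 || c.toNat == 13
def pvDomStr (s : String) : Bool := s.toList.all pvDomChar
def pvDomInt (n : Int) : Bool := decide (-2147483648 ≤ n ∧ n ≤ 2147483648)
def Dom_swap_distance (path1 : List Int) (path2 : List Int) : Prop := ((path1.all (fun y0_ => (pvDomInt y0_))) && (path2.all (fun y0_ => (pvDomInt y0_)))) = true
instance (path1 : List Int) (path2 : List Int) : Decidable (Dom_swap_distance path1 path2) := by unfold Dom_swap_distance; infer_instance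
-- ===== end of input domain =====

-- B replaces A's O(n^2) pairwise double loop by counting the m positions where the
-- (cyclically extended) paths agree and returning C(n,2) - C(m,2) in one O(n) pass.

-- ===== PORT A =====
def swap_distance (path1 : List Int) (path2 : List Int) : Int :=
  -- path1 = path1 + (path1[0],); path2 = path2 + (path2[0],)
  let p1 := path1 ++ [PySem.List.pyGetD path1 0 0]
  let p2 := path2 ++ [PySem.List.pyGetD path2 0 0]
  (PySem.List.pyRange 0 (PySem.List.len p1) 1).foldl (fun distance i =>
    (PySem.List.pyRange (i + 1) (PySem.List.len p1) 1).foldl (fun distance j =>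
      if (PySem.List.pyGetD p1 i 0, PySem.List.pyGetD p1 j 0)
           ≠ (PySem.List.pyGetD p2 i 0, PySem.List.pyGetD p2 j 0)
      then distance + 1 else distance) distance) 0

-- ===== PORT B =====
def swap_distance_alt (path1 : List Int) (path2 : List Int) : Int :=
  let e1 := path1 ++ [PySem.List.pyGetD path1 0 0]
  let e2 := path2 ++ [PySem.List.pyGetD path2 0 0]
  let n := PySem.List.len e1
  let m := ((PySem.List.pyRange 0 n 1).map (fun i =>
      if PySem.List.pyGetD e1 i 0 == PySem.List.pyGetD e2 i 0 then (1 : Int) else 0)).sum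
  PySem.Int.floordiv (n * (n - 1)) 2 - PySem.Int.floordiv (m * (m - 1)) 2

-- ===== PRECONDITION & SPEC =====
-- Pre_ excludes exactly the inputs where Python A raises IndexError:
-- empty path1 or path2 (path[0]), or path2 shorter than path1 (path2[j] out of range).
def Pre_swap_distance (path1 : List Int) (path2 : List Int) : Prop :=
  path1 ≠ [] ∧ path2 ≠ [] ∧ path1.length ≤ path2.length
instance (path1 : List Int) (path2 : List Int) : Decidable (Pre_swap_distance path1 path2) := by
  unfold Pre_swap_distance; infer_instance

def pvWitness_swap_distance : List Int × List Int := ([1, 2, 3], [2, 1, 3])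

def Spec_swap_distance (path1 : List Int) (path2 : List Int) (out : Int) : Prop := out = swap_distance_alt path1 path2
instance (path1 : List Int) (path2 : List Int) (out : Int) : Decidable (Spec_swap_distance path1 path2 out) := by unfold Spec_swap_distance; infer_instance

-- ===== CLAIM (what is proved, stated in full; the proofs are below) =====
def Claim_equal_swap_distance : Prop := ∀ (path1 : List Int) (path2 : List Int), Dom_swap_distance path1 path2 → Pre_swap_distance path1 path2 → Spec_swap_distance path1 path2 (swap_distance path1 path2)

-- ===== LEMMAS AND PROOFS =====

-- The agreement predicate between the two extended paths, over Nat indices.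
def pvEq (p1 p2 : List Int) (i : ℕ) : Bool := p1.getD i 0 == p2.getD i 0

-- Number of agreeing positions below n.
def pvM (e : ℕ → Bool) (n : ℕ) : ℕ := (List.range n).countP e

-- A's double loop as a sum of inner counts (Nat indices).
def pvS (e : ℕ → Bool) (n : ℕ) : ℤ :=
  ∑ i ∈ Finset.range n, (((List.range (n - (i + 1))).countP (fun t => !(e i && e (i + 1 + t)))) : ℤ)

lemma pvM_succ (e : ℕ → Bool) (n : ℕ) :
    pvM e (n + 1) = pvM e n + (if e n then 1 else 0) := by
  simp [pvM, List.range_succ, List.countP_append, List.countP_singleton]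

lemma pvM_eq_sum (e : ℕ → Bool) (n : ℕ) :
    (pvM e n : ℤ) = ∑ i ∈ Finset.range n, (if e i then (1 : ℤ) else 0) := by
  induction n with
  | zero => simp [pvM]
  | succ n ih =>
      rw [Finset.sum_range_succ, ← ih]
      simp [pvM, List.range_succ, List.countP_append, List.countP_singleton]

lemma pvS_succ (e : ℕ → Bool) (n : ℕ) :
    pvS e (n + 1) = pvS e n + (if e n then (n : ℤ) - pvM e n else (n : ℤ)) := by
  unfold pvS
  rw [Finset.sum_range_succ]
  have hterm : ∀ i ∈ Finset.range n,
      (((List.range (n + 1 - (i + 1))).countP (fun t => !(e i && e (i + 1 + t)))) : ℤ)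
      = ((List.range (n - (i + 1))).countP (fun t => !(e i && e (i + 1 + t))) : ℤ)
        + (if !(e i && e n) then 1 else 0) := by
    intro i hi
    have hi' : i < n := Finset.mem_range.mp hi
    have h1 : n + 1 - (i + 1) = (n - (i + 1)) + 1 := by omega
    have h2 : i + 1 + (n - (i + 1)) = n := by omega
    rw [h1, List.range_succ, List.countP_append, List.countP_singleton, h2]
    push_cast
    split <;> simp
  rw [Finset.sum_congr rfl hterm, Finset.sum_add_distrib]
  simp only [Nat.sub_self, List.range_zero, List.countP_nil, Nat.cast_zero, add_zero]
  congr 1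
  by_cases h : e n = true
  · have : ∀ i, (if !(e i && e n) then (1 : ℤ) else 0) = 1 - (if e i then (1 : ℤ) else 0) := by
      intro i; rw [h]; cases e i <;> simp
    rw [Finset.sum_congr rfl (fun i _ => this i), Finset.sum_sub_distrib, ← pvM_eq_sum,
      Finset.sum_const, Finset.card_range, h]
    simp
  · have hf : e n = false := by simpa using h
    simp [hf]

lemma pvS_key (e : ℕ → Bool) (n : ℕ) :
    2 * pvS e n = (n : ℤ) * (n - 1) - (pvM e n : ℤ) * (pvM e n - 1) := by
  induction n with
  | zero => simp [pvS, pvM]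
  | succ n ih =>
      rw [pvS_succ, pvM_succ]
      by_cases h : e n = true
      · simp only [h, if_pos]
        push_cast
        linear_combination ih
      · simp only [eq_false_of_ne_true h, if_neg Bool.false_ne_true]
        push_cast
        linear_combination ih

lemma swap_distance_eq_S (path1 path2 : List Int) :
    swap_distance path1 path2 =
      pvS (pvEq (path1 ++ [PySem.List.pyGetD path1 0 0]) (path2 ++ [PySem.List.pyGetD path2 0 0]))
          (path1.length + 1) := by
  unfold swap_distance
  set p1 := path1 ++ [PySem.List.pyGetD path1 0 0] with hp1
  set p2 := path2 ++ [PySem.List.pyGetD path2 0 0] with hp2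
  have hlen : p1.length = path1.length + 1 := by simp [hp1]
  set N := path1.length + 1 with hN
  simp only [PySem.List.len_eq, hlen]
  rw [PySem.List.pyRange_zero_natCast, List.foldl_map]
  have hinner : ∀ (d : ℤ) (k : ℕ),
      (PySem.List.pyRange ((k : ℤ) + 1) (N : ℤ) 1).foldl (fun distance j =>
        if (PySem.List.pyGetD p1 ((k : ℤ)) 0, PySem.List.pyGetD p1 j 0)
             ≠ (PySem.List.pyGetD p2 ((k : ℤ)) 0, PySem.List.pyGetD p2 j 0)
        then distance + 1 else distance) d
      = d + ((List.range (N - (k + 1))).countP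
              (fun t => !(pvEq p1 p2 k && pvEq p1 p2 (k + 1 + t))) : ℤ) := by
    intro d k
    rw [PySem.List.pyRange_one, List.foldl_map, PySem.List.foldl_ite_add_one]
    congr 1
    have ht : ((N : ℤ) - ((k : ℤ) + 1)).toNat = N - (k + 1) := by omega
    rw [ht]
    norm_cast
    apply List.countP_congr
    intro t ht'
    simp only [PySem.List.pyGetD_natCast, pvEq, Prod.mk.injEq, not_and_or]
    rcases heq1 : p1.getD k 0 == p2.getD k 0 <;> rcases heq2 : p1.getD (k+1+t) 0 == p2.getD (k+1+t) 0 <;>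
      simp_all
  rw [show (fun (x : ℤ) (y : ℕ) =>
        (PySem.List.pyRange ((y : ℤ) + 1) (N : ℤ) 1).foldl (fun distance j =>
          if (PySem.List.pyGetD p1 ((y : ℤ)) 0, PySem.List.pyGetD p1 j 0)
               ≠ (PySem.List.pyGetD p2 ((y : ℤ)) 0, PySem.List.pyGetD p2 j 0)
          then distance + 1 else distance) x)
      = (fun (d : ℤ) (k : ℕ) => d + ((List.range (N - (k + 1))).countP
              (fun t => !(pvEq p1 p2 k && pvEq p1 p2 (k + 1 + t))) : ℤ)) from
      funext fun d => funext fun k => hinner d k]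
  rw [PySem.List.foldl_add, zero_add]
  rfl

lemma swap_distance_alt_eq (path1 path2 : List Int) :
    swap_distance_alt path1 path2 =
      ((((path1.length + 1 : ℕ)) : ℤ) * ((path1.length + 1 : ℕ) - 1)) / 2 -
      ((pvM (pvEq (path1 ++ [PySem.List.pyGetD path1 0 0]) (path2 ++ [PySem.List.pyGetD path2 0 0])) (path1.length + 1) : ℤ) *
       ((pvM (pvEq (path1 ++ [PySem.List.pyGetD path1 0 0]) (path2 ++ [PySem.List.pyGetD path2 0 0])) (path1.length + 1) : ℤ) - 1)) / 2 := by
  unfold swap_distance_alt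
  have hlen : (path1 ++ [PySem.List.pyGetD path1 0 0]).length = path1.length + 1 := by simp
  simp only [PySem.List.len_eq, hlen]
  push_cast
  rw [show ((path1.length : ℤ) + 1) = ((path1.length + 1 : ℕ) : ℤ) by push_cast; ring]
  rw [PySem.List.pyRange_zero_natCast, List.map_map]
  rw [List.map_congr_left (fun k hk => ?_), PySem.List.sum_map_ite_one_zero
        (pvEq (path1 ++ [PySem.List.pyGetD path1 0 0]) (path2 ++ [PySem.List.pyGetD path2 0 0]))]
  · rw [PySem.Int.floordiv_eq_ediv_of_pos (by norm_num), PySem.Int.floordiv_eq_ediv_of_pos (by norm_num)]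
    rfl
  · simp [pvEq, Function.comp]

-- ===== VERDICT (by name: the statement is the Claim_ definition above) =====
theorem swap_distance_spec : Claim_equal_swap_distance := by
  intro path1 path2 _ _
  unfold Spec_swap_distance
  rw [swap_distance_eq_S, swap_distance_alt_eq]
  have hkey := pvS_key (pvEq (path1 ++ [PySem.List.pyGetD path1 0 0]) (path2 ++ [PySem.List.pyGetD path2 0 0])) (path1.length + 1)
  set N : ℕ := path1.length + 1
  set M : ℕ := pvM (pvEq (path1 ++ [PySem.List.pyGetD path1 0 0]) (path2 ++ [PySem.List.pyGetD path2 0 0])) N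
  have hx : (2 : ℤ) ∣ (N : ℤ) * (N - 1) := by
    rcases Int.even_mul_succ_self ((N : ℤ) - 1) with ⟨k, hk⟩
    exact ⟨k, by linarith⟩
  have hy : (2 : ℤ) ∣ (M : ℤ) * (M - 1) := by
    rcases Int.even_mul_succ_self ((M : ℤ) - 1) with ⟨k, hk⟩
    exact ⟨k, by linarith⟩
  omega
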